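-- pv_equiv track=rewrite | github.com/shirtandtieler/Job-Website-Project | resources/generators/seeker_gen.py | ordered_skills
-- ===== SOURCE A (Python) =====
-- from operator import itemgetter
-- from typing import Tuple, List
--
-- def ordered_skills(skills: dict) -> Tuple[List[List[str]], List[int]]:
--     # get reverse ordered pair of 'name', 'int_level'
--     spairs = skills.items()
--     spairs = [(i[0], i[1]['level']) for i in spairs]
--     spairs.sort(key=itemgetter(1), reverse=True)
--     slists, slvls = [], []
--     if len(spairs) == 0:
--         return slists, slvls
--     slist, last_lvl = [], spairs[0][1]
--     for skl, lvl in spairs: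
--         if lvl == last_lvl:
--             slist.append(skl)
--         else:
--             slists.append(slist)
--             slvls.append(last_lvl)
--
--             slist = [skl]
--             last_lvl = lvl
--     if slist:
--         slists.append(slist)
--         slvls.append(last_lvl)
--     return slists, slvls
-- ===== SOURCE B (Python) =====
-- def ordered_skills(skills):
--     # bucket names by level in one pass, then emit buckets by descending level
--     buckets = {}
--     for name, info in skills.items():
--         buckets.setdefault(info['level'], []).append(name)
--     lvls = sorted(buckets, reverse=True)
--     return [buckets[l] for l in lvls], lvls
-- ===== Notes on version B (the rewrite author's own statement) =====
-- stated objective: simpler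
-- what changed: Replaces sort-all-pairs-then-scan-for-run-breaks (with explicit run/last-level accumulator state and a final flush) by bucketing names per level in a dict in one pass and emitting the buckets for the distinct levels sorted descending.
import Mathlib
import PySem

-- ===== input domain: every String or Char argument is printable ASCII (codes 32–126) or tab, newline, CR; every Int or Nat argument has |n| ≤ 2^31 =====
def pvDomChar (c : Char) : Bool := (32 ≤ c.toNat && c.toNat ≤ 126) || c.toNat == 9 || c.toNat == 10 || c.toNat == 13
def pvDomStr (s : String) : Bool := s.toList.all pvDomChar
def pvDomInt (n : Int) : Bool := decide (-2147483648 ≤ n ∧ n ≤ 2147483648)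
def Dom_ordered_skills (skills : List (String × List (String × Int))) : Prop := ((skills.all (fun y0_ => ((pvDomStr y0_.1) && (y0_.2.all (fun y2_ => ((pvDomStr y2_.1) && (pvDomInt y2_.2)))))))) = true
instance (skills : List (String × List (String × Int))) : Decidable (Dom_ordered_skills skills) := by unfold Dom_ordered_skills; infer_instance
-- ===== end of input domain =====

-- B buckets names per level in a dict in one pass and emits buckets by descending level,
-- instead of A's sort-all-pairs-then-scan-for-run-breaks; equivalence proved on inputs whose
-- inner dicts carry the 'level' key (elsewhere both Pythons raise KeyError).


-- ===== PORT A =====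
-- i[1]['level'] : the inner dict lookup (Pre_ guarantees the key is present, so the getD 0
-- default is never reached); shared by both ports since both Pythons write info['level'].
def pvLevel (inner : List (String × Int)) : Int :=
  ((PySem.Dict.ofList inner).get? "level").getD 0

-- the body of A's for-loop, on state (slists, slvls, slist, last_lvl)
def pvStep (st : List (List String) × List Int × List String × Int) (p : String × Int) :
    List (List String) × List Int × List String × Int :=
  if p.2 = st.2.2.2 then (st.1, st.2.1, st.2.2.1 ++ [p.1], st.2.2.2)
  else (st.1 ++ [st.2.2.1], st.2.1 ++ [st.2.2.2], [p.1], p.2)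

-- A's trailing 'if slist: slists.append(slist); slvls.append(last_lvl)'
def pvFlush (st : List (List String) × List Int × List String × Int) :
    List (List String) × List Int :=
  if st.2.2.1 ≠ [] then (st.1 ++ [st.2.2.1], st.2.1 ++ [st.2.2.2]) else (st.1, st.2.1)

def ordered_skills (skills : List (String × List (String × Int))) : List (List String) × List Int :=
  let spairs := (PySem.Dict.ofList skills).items.map (fun i => (i.1, pvLevel i.2))
  let spairs := PySem.List.sorted spairs (fun p => p.2) true
  match spairs with
  | [] => ([], [])
  | s0 :: _ => pvFlush (spairs.foldl pvStep ([], [], [], s0.2))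

-- ===== PORT B =====
def ordered_skills_alt (skills : List (String × List (String × Int))) : List (List String) × List Int :=
  let buckets := (PySem.Dict.ofList skills).items.foldl
    (fun (b : PySem.Dict Int (List String)) i => b.modify (pvLevel i.2) [] (fun xs => xs ++ [i.1]))
    PySem.Dict.empty
  let lvls := PySem.List.sorted buckets.keys (fun l => l) true
  (lvls.map (fun l => buckets.getD l []), lvls)

-- ===== PRECONDITION & SPEC =====
-- Pre_ excludes exactly the inputs where some inner dict lacks the 'level' key: there the
-- Python A (and B alike) raises KeyError.
def Pre_ordered_skills (skills : List (String × List (String × Int))) : Prop :=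
  ∀ p ∈ skills, "level" ∈ p.2.map Prod.fst
instance (skills : List (String × List (String × Int))) : Decidable (Pre_ordered_skills skills) := by unfold Pre_ordered_skills; infer_instance

def pvWitness_ordered_skills : (List (String × List (String × Int))) :=
  [("python", [("level", 3)]), ("sql", [("level", 1)]), ("c", [("level", 3)])]

def Spec_ordered_skills (skills : List (String × List (String × Int))) (out : List (List String) × List Int) : Prop := out = ordered_skills_alt skills
instance (skills : List (String × List (String × Int))) (out : List (List String) × List Int) : Decidable (Spec_ordered_skills skills out) := by unfold Spec_ordered_skills; infer_instance

-- ===== CLAIM (what is proved, stated in full; the proofs are below) =====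
def Claim_equal_ordered_skills : Prop := ∀ (skills : List (String × List (String × Int))), Dom_ordered_skills skills → Pre_ordered_skills skills → Spec_ordered_skills skills (ordered_skills skills)

-- ===== LEMMAS AND PROOFS =====

-- consecutive-run grouping of a (name, level) list, the shape A's scan computes
def pvGroup : List (String × Int) → List (List String) × List Int
  | [] => ([], [])
  | p :: t =>
    let r := pvGroup (t.dropWhile (fun q => decide (q.2 = p.2)))
    ((p.1 :: (t.takeWhile (fun q => decide (q.2 = p.2))).map Prod.fst) :: r.1, p.2 :: r.2)
termination_by ss => ss.length
decreasing_by simpa using Nat.lt_succ_of_le (List.length_dropWhile_le _ _)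

-- the distinct levels in first-occurrence order
def pvLvls : List (String × Int) → List Int
  | [] => []
  | p :: t => p.2 :: pvLvls (t.dropWhile (fun q => decide (q.2 = p.2)))
termination_by ss => ss.length
decreasing_by simpa using Nat.lt_succ_of_le (List.length_dropWhile_le _ _)

-- A's run accumulator, recursively
def pvAux (last : Int) (slist : List String) : List (String × Int) → List (List String) × List Int
  | [] => if slist ≠ [] then ([slist], [last]) else ([], [])
  | p :: t =>
    if p.2 = last then pvAux last (slist ++ [p.1]) t
    else (slist :: (pvAux p.2 [p.1] t).1, last :: (pvAux p.2 [p.1] t).2)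

theorem pvFlush_foldl (ss : List (String × Int)) :
    ∀ sl sv slist last, pvFlush (ss.foldl pvStep (sl, sv, slist, last)) =
      (sl ++ (pvAux last slist ss).1, sv ++ (pvAux last slist ss).2) := by
  induction ss with
  | nil =>
    intro sl sv slist last
    simp only [List.foldl_nil, pvAux, pvFlush]
    by_cases h : slist = [] <;> simp [h]
  | cons p t ih =>
    intro sl sv slist last
    simp only [List.foldl_cons, pvAux, pvStep]
    by_cases h : p.2 = last
    · simp [h, ih]
    · simp [h, ih, List.append_assoc]

theorem pvAux_eq_group (t : List (String × Int)) :
    ∀ last slist, slist ≠ [] →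
      pvAux last slist t =
        ((slist ++ (t.takeWhile (fun q => decide (q.2 = last))).map Prod.fst)
            :: (pvGroup (t.dropWhile (fun q => decide (q.2 = last)))).1,
          last :: (pvGroup (t.dropWhile (fun q => decide (q.2 = last)))).2) := by
  induction t with
  | nil =>
    intro last slist h
    simp [pvAux, pvGroup, h]
  | cons q t ih =>
    intro last slist h
    rw [List.takeWhile_cons, List.dropWhile_cons, pvAux]
    by_cases hq : q.2 = last
    · rw [if_pos hq, if_pos (by simp [hq]), if_pos (by simp [hq])]
      rw [ih last (slist ++ [q.1]) (by simp)]
      simp [List.append_assoc]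
    · rw [if_neg hq, if_neg (by simp [hq]), if_neg (by simp [hq])]
      rw [ih q.2 [q.1] (by simp), pvGroup]
      simp

theorem pvA_eq_group (spairs : List (String × Int)) :
    (match PySem.List.sorted spairs (fun p => p.2) true with
      | [] => (([], []) : List (List String) × List Int)
      | s0 :: _ => pvFlush ((PySem.List.sorted spairs (fun p => p.2) true).foldl pvStep ([], [], [], s0.2)))
      = pvGroup (PySem.List.sorted spairs (fun p => p.2) true) := by
  cases hss : PySem.List.sorted spairs (fun p => p.2) true with
  | nil => simp [pvGroup]
  | cons s0 rest =>
    show pvFlush ((s0 :: rest).foldl pvStep ([], [], [], s0.2)) = pvGroup (s0 :: rest)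
    rw [List.foldl_cons]
    have hstep : pvStep ([], [], [], s0.2) s0 = ([], [], [s0.1], s0.2) := by
      simp [pvStep]
    rw [hstep, pvFlush_foldl, pvAux_eq_group rest s0.2 [s0.1] (by simp), pvGroup]
    simp

theorem pvLt_of_mem_dropWhile (t : List (String × Int)) (L : Int) :
    t.Pairwise (fun a b => b.2 ≤ a.2) → (∀ q ∈ t, q.2 ≤ L) →
    ∀ q ∈ t.dropWhile (fun q => decide (q.2 = L)), q.2 < L := by
  induction t with
  | nil => simp
  | cons r t ih =>
    intro hp hle
    rw [List.pairwise_cons] at hp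
    by_cases hr : r.2 = L
    · rw [List.dropWhile_cons]
      simp only [hr, decide_true, if_true]
      exact ih hp.2 (fun q hq => hle q (List.mem_cons_of_mem _ hq))
    · rw [List.dropWhile_cons]
      simp only [hr, decide_false]
      intro q hq
      rcases List.mem_cons.1 hq with rfl | hq'
      · exact lt_of_le_of_ne (hle q (List.mem_cons_self)) hr
      · exact lt_of_le_of_lt (hp.1 q hq')
          (lt_of_le_of_ne (hle r (List.mem_cons_self)) hr)


theorem pvLvls_mem (ss : List (String × Int)) (hp : ss.Pairwise (fun a b => b.2 ≤ a.2)) :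
    ∀ l, l ∈ pvLvls ss ↔ l ∈ ss.map Prod.snd := by
  induction ss using pvLvls.induct with
  | case1 => simp [pvLvls]
  | case2 p t ih =>
    rw [List.pairwise_cons] at hp
    have hdw : (t.dropWhile (fun q => decide (q.2 = p.2))).Pairwise (fun a b => b.2 ≤ a.2) :=
      hp.2.sublist (List.dropWhile_sublist _)
    intro l
    rw [pvLvls]
    constructor
    · intro hl
      rcases List.mem_cons.1 hl with rfl | hl'
      · simp
      · have := ((ih hdw l).1 hl')
        rcases List.mem_map.1 this with ⟨q, hq, rfl⟩
        exact List.mem_map_of_mem (List.mem_cons_of_mem _ ((List.dropWhile_sublist _).mem hq))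
    · intro hl
      rcases List.mem_map.1 hl with ⟨q, hq, rfl⟩
      rcases List.mem_cons.1 hq with rfl | hq'
      · exact List.mem_cons_self
      · by_cases hql : q.2 = p.2
        · rw [hql]; exact List.mem_cons_self
        · apply List.mem_cons_of_mem
          refine (ih hdw q.2).2 ?_
          apply List.mem_map_of_mem
          have hsplit := List.takeWhile_append_dropWhile
            (p := fun q => decide (q.2 = p.2)) (l := t)
          rw [← hsplit] at hq'
          rcases List.mem_append.1 hq' with htw | hdw'
          · exact absurd (by simpa using List.mem_takeWhile_imp htw) hql
          · exact hdw'

theorem pvLvls_pairwise (ss : List (String × Int)) (hp : ss.Pairwise (fun a b => b.2 ≤ a.2)) :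
    (pvLvls ss).Pairwise (fun a b => b < a) := by
  induction ss using pvLvls.induct with
  | case1 => simp [pvLvls]
  | case2 p t ih =>
    rw [List.pairwise_cons] at hp
    have hdw : (t.dropWhile (fun q => decide (q.2 = p.2))).Pairwise (fun a b => b.2 ≤ a.2) :=
      hp.2.sublist (List.dropWhile_sublist _)
    rw [pvLvls, List.pairwise_cons]
    refine ⟨?_, ih hdw⟩
    intro l hl
    rcases List.mem_map.1 ((pvLvls_mem _ hdw l).1 hl) with ⟨q, hq, rfl⟩
    exact pvLt_of_mem_dropWhile t p.2 hp.2 hp.1 q hq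

theorem pvGroup_eq_filters (ss : List (String × Int)) (hp : ss.Pairwise (fun a b => b.2 ≤ a.2)) :
    pvGroup ss = ((pvLvls ss).map
        (fun l => (ss.filter (fun q => decide (q.2 = l))).map Prod.fst), pvLvls ss) := by
  induction ss using pvGroup.induct with
  | case1 => simp [pvGroup, pvLvls]
  | case2 p t ih =>
    rw [List.pairwise_cons] at hp
    have hdw : (t.dropWhile (fun q => decide (q.2 = p.2))).Pairwise (fun a b => b.2 ≤ a.2) :=
      hp.2.sublist (List.dropWhile_sublist _)
    have hlt := pvLt_of_mem_dropWhile t p.2 hp.2 hp.1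
    have htw : ∀ q ∈ t.takeWhile (fun q => decide (q.2 = p.2)), q.2 = p.2 :=
      fun q hq => by simpa using List.mem_takeWhile_imp hq
    have hsplit := List.takeWhile_append_dropWhile
      (p := fun q => decide (q.2 = p.2)) (l := t)
    have h1 : t.filter (fun q => decide (q.2 = p.2)) = t.takeWhile (fun q => decide (q.2 = p.2)) := by
      conv_lhs => rw [← hsplit]
      rw [List.filter_append,
        List.filter_eq_self.2 (fun q hq => by simp [htw q hq]),
        List.filter_eq_nil_iff.2 (fun q hq => by simp [ne_of_lt (hlt q hq)]),
        List.append_nil]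
    have hhead : (p :: t).filter (fun q => decide (q.2 = p.2))
        = p :: t.takeWhile (fun q => decide (q.2 = p.2)) := by
      rw [List.filter_cons, if_pos (by simp), h1]
    have h2 : ∀ l ∈ pvLvls (t.dropWhile (fun q => decide (q.2 = p.2))),
        (p :: t).filter (fun q => decide (q.2 = l))
          = (t.dropWhile (fun q => decide (q.2 = p.2))).filter (fun q => decide (q.2 = l)) := by
      intro l hl
      rcases List.mem_map.1 ((pvLvls_mem _ hdw l).1 hl) with ⟨q, hq, rfl⟩
      have hql : q.2 < p.2 := hlt q hq
      rw [List.filter_cons, if_neg (by simp [(ne_of_lt hql).symm])]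
      conv_lhs => rw [← hsplit]
      rw [List.filter_append,
        List.filter_eq_nil_iff.2 (fun r hr => by simp [htw r hr, (ne_of_lt hql).symm]),
        List.nil_append]
    rw [pvGroup, pvLvls, ih hdw]
    simp only [List.map_cons, Prod.mk.injEq]
    refine ⟨?_, trivial⟩
    rw [List.cons_eq_cons]
    constructor
    · rw [hhead]
      simp
    · symm
      apply List.map_congr_left
      intro l hl
      rw [h2 l hl]

theorem pvGetD_foldl_modify (ps : List (String × Int)) :
    ∀ (d : PySem.Dict Int (List String)) (l : Int),
      (ps.foldl (fun b p => b.modify p.2 [] (fun xs => xs ++ [p.1])) d).getD l []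
        = d.getD l [] ++ (ps.filter (fun q => decide (q.2 = l))).map Prod.fst := by
  induction ps with
  | nil => simp
  | cons p ps ih =>
    intro d l
    rw [List.foldl_cons, ih, PySem.Dict.getD_modify, List.filter_cons]
    by_cases h : p.2 = l
    · simp [h, List.append_assoc]
    · have h' : ¬ l = p.2 := fun hl => h hl.symm
      simp [h, h']

theorem pvKeys_foldl_modify_mem (ps : List (String × Int)) :
    ∀ (d : PySem.Dict Int (List String)) (l : Int),
      (l ∈ (ps.foldl (fun b p => b.modify p.2 [] (fun xs => xs ++ [p.1])) d).keys
        ↔ l ∈ d.keys ∨ l ∈ ps.map Prod.snd) := by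
  induction ps with
  | nil => simp
  | cons p ps ih =>
    intro d l
    rw [List.foldl_cons, ih]
    have : l ∈ (d.modify p.2 [] (fun xs => xs ++ [p.1])).keys ↔ l = p.2 ∨ l ∈ d.keys := by
      rw [PySem.Dict.keys_modify]
      exact PySem.Dict.mem_keys_insert _ _ _ _
    rw [this]
    simp only [List.map_cons, List.mem_cons]
    tauto

theorem pvKeys_foldl_modify_nodup (ps : List (String × Int)) :
    ∀ (d : PySem.Dict Int (List String)), d.keys.Nodup →
      (ps.foldl (fun b p => b.modify p.2 [] (fun xs => xs ++ [p.1])) d).keys.Nodup := by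
  induction ps with
  | nil => intro d h; simpa using h
  | cons p ps ih =>
    intro d h
    rw [List.foldl_cons]
    apply ih
    rw [PySem.Dict.keys_modify]
    exact PySem.Dict.nodup_keys_insert _ _ _ h

theorem pvFilter_insertBy (acc : List (String × Int)) (x : String × Int) (l : Int)
    (hp : acc.Pairwise (fun a b => b.2 ≤ a.2)) :
    (PySem.List.insertBy (fun a b => decide (b.2 < a.2)) x acc).filter (fun q => decide (q.2 = l))
      = acc.filter (fun q => decide (q.2 = l)) ++ (if x.2 = l then [x] else []) := by
  induction acc with
  | nil =>
    by_cases h : x.2 = l <;> simp [PySem.List.insertBy, h]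
  | cons y ys ih =>
    rw [List.pairwise_cons] at hp
    rw [PySem.List.insertBy]
    by_cases hlt : y.2 < x.2
    · simp only [hlt, decide_true, if_true]
      by_cases h : x.2 = l
      · have hnil : (y :: ys).filter (fun q => decide (q.2 = l)) = [] := by
          apply List.filter_eq_nil_iff.2
          intro q hq
          simp only [decide_eq_true_eq]
          rcases List.mem_cons.1 hq with rfl | hq'
          · exact ne_of_lt (h ▸ hlt)
          · exact ne_of_lt (lt_of_le_of_lt (hp.1 q hq') (h ▸ hlt))
        rw [hnil]
        simp [h, hnil]
      · simp [h]
    · rw [if_neg (by simp [hlt])]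
      rw [List.filter_cons, List.filter_cons, ih hp.2]
      by_cases hy : y.2 = l <;> simp [hy]

theorem pvSorted_filter_stable (xs : List (String × Int)) (l : Int) :
    (PySem.List.sorted xs (fun p => p.2) true).filter (fun q => decide (q.2 = l))
      = xs.filter (fun q => decide (q.2 = l)) := by
  induction xs using List.reverseRecOn with
  | nil => rfl
  | append_singleton xs x ih =>
    rw [PySem.List.sorted_rev_eq_foldl_insertBy, List.foldl_append, List.foldl_cons,
      List.foldl_nil, ← PySem.List.sorted_rev_eq_foldl_insertBy,
      pvFilter_insertBy _ _ _ (PySem.List.sorted_pairwise_rev xs (fun p => p.2)), ih,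
      List.filter_append]
    by_cases h : x.2 = l <;> simp [h]

-- ===== VERDICT (by name: the statement is the Claim_ definition above) =====
theorem ordered_skills_spec : Claim_equal_ordered_skills := by
  intro skills _ _
  unfold Spec_ordered_skills ordered_skills ordered_skills_alt
  simp only
  set items := (PySem.Dict.ofList skills).items with hitems
  set spairs := items.map (fun i => (i.1, pvLevel i.2)) with hspairs
  set ss := PySem.List.sorted spairs (fun p => p.2) true with hss
  set d := items.foldl
    (fun (b : PySem.Dict Int (List String)) i => b.modify (pvLevel i.2) [] (fun xs => xs ++ [i.1]))
    PySem.Dict.empty with hd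
  have hdfold : d = spairs.foldl
      (fun (b : PySem.Dict Int (List String)) p => b.modify p.2 [] (fun xs => xs ++ [p.1]))
      PySem.Dict.empty := by
    rw [hspairs, List.foldl_map]
  have hp : ss.Pairwise (fun a b => b.2 ≤ a.2) :=
    PySem.List.sorted_pairwise_rev spairs (fun p => p.2)
  have hgetD : ∀ l, d.getD l [] = (ss.filter (fun q => decide (q.2 = l))).map Prod.fst := by
    intro l
    rw [hdfold, pvGetD_foldl_modify, pvSorted_filter_stable]
    simp
  have hkeysmem : ∀ l, l ∈ d.keys ↔ l ∈ ss.map Prod.snd := by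
    intro l
    rw [hdfold, pvKeys_foldl_modify_mem]
    have hpm : (ss.map Prod.snd).Perm (spairs.map Prod.snd) :=
      (PySem.List.sorted_perm spairs (fun p => p.2) true).map Prod.snd
    rw [hpm.mem_iff]
    simp
  have hknodup : d.keys.Nodup := by
    rw [hdfold]
    exact pvKeys_foldl_modify_nodup _ _ PySem.Dict.nodup_keys_empty
  have hMnodup : (pvLvls ss).Nodup :=
    (pvLvls_pairwise ss hp).imp (fun h => ne_of_gt h)
  have hperm : (pvLvls ss).Perm d.keys := by
    rw [List.perm_ext_iff_of_nodup hMnodup hknodup]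
    intro l
    rw [hkeysmem, pvLvls_mem ss hp]
  have hL : PySem.List.sorted d.keys (fun l => l) true = pvLvls ss :=
    PySem.List.sorted_rev_eq_of_perm_of_pairwise_gt d.keys (pvLvls ss) (fun l => l)
      hperm (pvLvls_pairwise ss hp)
  have hA := pvA_eq_group spairs
  rw [← hss] at hA
  rw [hA, pvGroup_eq_filters ss hp, hL]
  refine congrArg (fun x => (x, pvLvls ss)) ?_
  apply List.map_congr_left
  intro l _
  rw [hgetD]
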